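-- pv_equiv track=rewrite | github.com/steveire/grantlee | scripts/fix-clang-format.py | fixClangFormat
-- ===== SOURCE A (Python) =====
-- def fixClangFormat(input):
--
--   output = ""
--
--   start = 0
--
--   while start < len(input):
--     found = input.find("QStri" + "ngLiteral(", start)
--     if (found < 0):
--       break
--     beg = found + len("QStrin" + "gLiteral(")
--
--     quoteLoc = input.find("\"", beg)
--     closeLoc = input.find(")", beg)
--     if (quoteLoc < 0 or closeLoc < quoteLoc):
--       output += input[start:closeLoc]
--       start = closeLoc
--       continue
--
--     output += input[start:beg]
--
--     numFragments = 0
--     origCloseLoc = closeLoc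
--     origQuoteLoc = quoteLoc
--
--     quoteLocStart = beg
--     while closeLoc > quoteLoc:
--       numFragments += 1
--       endQuoteLoc = input.find("\"", quoteLoc + 1)
--       while True:
--         numEscapes = 0
--         escStart = endQuoteLoc - 1
--         while(input[escStart] == "\\"):
--           numEscapes += 1
--           escStart -= 1
--         if (numEscapes % 2 != 0):
--           endQuoteLoc = input.find("\"", endQuoteLoc + 1)
--         else:
--           break
--
--       closeLoc = input.find(")", endQuoteLoc + 1)
--       quoteLoc = input.find("\"", endQuoteLoc + 1)
--       if (quoteLoc < 0):
--         break
--
--     if (numFragments == 1):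
--       output += input[beg:closeLoc]
--       start = closeLoc
--       continue
--
--     output += "\""
--
--     closeLoc = origCloseLoc
--     quoteLoc = origQuoteLoc
--
--     quoteLocStart = beg
--     while closeLoc > quoteLoc:
--       endQuoteLoc = input.find("\"", quoteLoc + 1)
--       while True:
--         numEscapes = 0
--         escStart = endQuoteLoc - 1
--         while(input[escStart] == "\\"):
--           numEscapes += 1
--           escStart -= 1
--         if (numEscapes % 2 != 0):
--           endQuoteLoc = input.find("\"", endQuoteLoc + 1)
--         else:
--           break
--
--       output += input[quoteLoc + 1:endQuoteLoc]
--
--       closeLoc = input.find(")", endQuoteLoc + 1)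
--       quoteLoc = input.find("\"", endQuoteLoc + 1)
--       if (quoteLoc < 0 or closeLoc < quoteLoc):
--         output += "\""
--       if (quoteLoc < 0):
--         break
--
--     start = closeLoc
--
--   output += input[start:]
--
--   return output
-- ===== SOURCE B (Python) =====
-- QSL = "QStri" + "ngLiteral("
--
--
-- def _endQuote(input, endQuoteLoc):
--   # first unescaped closing quote at/after endQuoteLoc (same escape rule as A)
--   while True:
--     numEscapes = 0
--     escStart = endQuoteLoc - 1
--     while input[escStart] == "\\":
--       numEscapes += 1
--       escStart -= 1
--     if numEscapes % 2 != 0: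
--       endQuoteLoc = input.find("\"", endQuoteLoc + 1)
--     else:
--       return endQuoteLoc
--
--
-- def _frags(input, quoteLoc, closeLoc):
--   # recursively emit the fragment bodies of one merged literal;
--   # returns (text, position where the caller resumes)
--   if closeLoc <= quoteLoc:
--     return "", closeLoc
--   e = _endQuote(input, input.find("\"", quoteLoc + 1))
--   frag = input[quoteLoc + 1:e]
--   cl = input.find(")", e + 1)
--   qu = input.find("\"", e + 1)
--   if qu < 0:
--     return frag + "\"", cl
--   rest, end = _frags(input, qu, cl)
--   if cl < qu:
--     return frag + "\"" + rest, end
--   return frag + rest, end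
--
--
-- def _step(input, start, found):
--   # handle one occurrence of the token; returns (text to emit, next start)
--   beg = found + len(QSL)
--   quoteLoc = input.find("\"", beg)
--   closeLoc = input.find(")", beg)
--   if quoteLoc < 0 or closeLoc < quoteLoc:
--     return input[start:closeLoc], closeLoc
--   e = _endQuote(input, input.find("\"", quoteLoc + 1))
--   cl = input.find(")", e + 1)
--   qu = input.find("\"", e + 1)
--   if qu < 0 or cl <= qu:
--     # a single string fragment: keep the call verbatim
--     return input[start:beg] + input[beg:cl], cl
--   body, end = _frags(input, quoteLoc, closeLoc)
--   return input[start:beg] + "\"" + body, end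
--
--
-- def fixClangFormat(input):
--   parts = []
--   start = 0
--   while start < len(input):
--     found = input.find(QSL, start)
--     if found < 0:
--       break
--     text, start = _step(input, start, found)
--     parts.append(text)
--   parts.append(input[start:])
--   return "".join(parts)
-- ===== Notes on version B (the rewrite author's own statement) =====
-- stated objective: simpler
-- what changed: A's monolithic while-loop with a count-pass then an orig-state-restoring emit-pass over each fragment group is replaced by a thin driver over a pure per-occurrence step function: a one-step lookahead decides the single-fragment early-out and a single forward recursion emits the fragment bodies, so the fragments are scanned once and the duplicated loop and the orig* save/restore disappear; output parts are collected in a list and joined once.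
-- outside the precondition, e.g. on fixClangFormat('QStringLiteral(x) ")'): A returns 'QStringLiteral(x) ")', B returns 'QStringLiteral(x) ")'
import Mathlib
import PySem

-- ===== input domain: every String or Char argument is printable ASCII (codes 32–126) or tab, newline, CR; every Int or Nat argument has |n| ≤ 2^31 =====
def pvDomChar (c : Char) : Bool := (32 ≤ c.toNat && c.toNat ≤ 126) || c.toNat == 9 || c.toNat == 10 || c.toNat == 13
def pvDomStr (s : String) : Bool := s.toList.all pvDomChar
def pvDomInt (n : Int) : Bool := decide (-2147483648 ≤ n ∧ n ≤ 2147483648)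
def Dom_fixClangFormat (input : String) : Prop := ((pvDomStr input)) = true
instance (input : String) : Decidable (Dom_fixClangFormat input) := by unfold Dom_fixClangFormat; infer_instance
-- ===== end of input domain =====

set_option maxRecDepth 4000

-- B replaces A's monolithic loop (with count-then-emit double fragment pass) by a driver over a
-- per-occurrence step function: a one-step lookahead decides the single-fragment case and one
-- forward recursion emits the fragment bodies; objective: simpler.


-- ===== PORT A =====

-- "QStri" + "ngLiteral(" (length 15)
def pvTok : List Char := ['Q','S','t','r','i','n','g','L','i','t','e','r','a','l','(']

-- input.find(sub, i)
def pvFind (s sub : List Char) (i : Int) : Int := PySem.Chars.findFrom s sub i none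

-- fuel bound for each of the Python while-loops: every loop variable is a strictly increasing
-- index into the string (under Pre_ below), so s.length + 2 steps always suffice there
def pvFuel (s : List Char) : Nat := s.length + 2

-- while input[escStart] == "\\": numEscapes += 1; escStart -= 1
-- (negative escStart wraps, as in Python, via pyGetD; Python's IndexError at escStart < -len is
-- unreachable once the token is present, since the scan stops on a non-backslash token char)
def pvEscCount (s : List Char) (escStart : Int) : Nat → Nat
  | 0 => 0
  | fuel+1 => if PySem.List.pyGetD s escStart ' ' = '\\' then pvEscCount s (escStart - 1) fuel + 1 else 0

-- the inner 'while True' escape-skipping loop (verbatim identical in A and in B's _endQuote helper)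
def pvEndQuote (s : List Char) (endQuoteLoc : Int) : Nat → Int
  | 0 => endQuoteLoc
  | fuel+1 =>
    if pvEscCount s (endQuoteLoc - 1) (pvFuel s) % 2 ≠ 0 then
      pvEndQuote s (pvFind s ['"'] (endQuoteLoc + 1)) fuel
    else endQuoteLoc

-- A's first fragment loop: count the fragments, returning (numFragments, final closeLoc)
def pvCountPass (s : List Char) (quoteLoc closeLoc : Int) (n : Nat) : Nat → Nat × Int
  | 0 => (n, closeLoc)
  | fuel+1 =>
    if closeLoc > quoteLoc then
      let e := pvEndQuote s (pvFind s ['"'] (quoteLoc + 1)) (pvFuel s)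
      let cl := pvFind s [')'] (e + 1)
      let qu := pvFind s ['"'] (e + 1)
      if qu < 0 then (n + 1, cl) else pvCountPass s qu cl (n + 1) fuel
    else (n, closeLoc)

-- A's second fragment loop: emit the fragment bodies (and closing quotes), from the saved
-- origQuoteLoc/origCloseLoc, returning (output, final closeLoc)
def pvEmitPass (s : List Char) (quoteLoc closeLoc : Int) (out : List Char) : Nat → List Char × Int
  | 0 => (out, closeLoc)
  | fuel+1 =>
    if closeLoc > quoteLoc then
      let e := pvEndQuote s (pvFind s ['"'] (quoteLoc + 1)) (pvFuel s)
      let out1 := out ++ PySem.List.slice s (some (quoteLoc + 1)) (some e)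
      let cl := pvFind s [')'] (e + 1)
      let qu := pvFind s ['"'] (e + 1)
      let out2 := if qu < 0 ∨ cl < qu then out1 ++ ['"'] else out1
      if qu < 0 then (out2, cl) else pvEmitPass s qu cl out2 fuel
    else (out, closeLoc)

-- A's outer 'while start < len(input)' loop, output accumulated as a char list
def pvOuterA (s : List Char) (start : Int) (out : List Char) : Nat → List Char
  | 0 => out ++ PySem.List.slice s (some start) none
  | fuel+1 =>
    if start < (s.length : Int) then
      let found := pvFind s pvTok start
      if found < 0 then out ++ PySem.List.slice s (some start) none
      else
        let beg := found + 15
        let quoteLoc := pvFind s ['"'] beg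
        let closeLoc := pvFind s [')'] beg
        if quoteLoc < 0 ∨ closeLoc < quoteLoc then
          pvOuterA s closeLoc (out ++ PySem.List.slice s (some start) (some closeLoc)) fuel
        else
          let out1 := out ++ PySem.List.slice s (some start) (some beg)
          let r := pvCountPass s quoteLoc closeLoc 0 (pvFuel s)
          if r.1 = 1 then
            pvOuterA s r.2 (out1 ++ PySem.List.slice s (some beg) (some r.2)) fuel
          else
            let er := pvEmitPass s quoteLoc closeLoc (out1 ++ ['"']) (pvFuel s)
            pvOuterA s er.2 er.1 fuel
    else out ++ PySem.List.slice s (some start) none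

def fixClangFormat (input : String) : String :=
  String.ofList (pvOuterA input.toList 0 [] (pvFuel input.toList))

-- ===== PORT B =====

-- B's _frags: forward recursion over the fragments of one merged literal, returning
-- (emitted text, position where the caller resumes)
def pvFrags (s : List Char) (quoteLoc closeLoc : Int) : Nat → List Char × Int
  | 0 => ([], closeLoc)
  | fuel+1 =>
    if closeLoc ≤ quoteLoc then ([], closeLoc)
    else
      let e := pvEndQuote s (pvFind s ['"'] (quoteLoc + 1)) (pvFuel s)
      let frag := PySem.List.slice s (some (quoteLoc + 1)) (some e)
      let cl := pvFind s [')'] (e + 1)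
      let qu := pvFind s ['"'] (e + 1)
      if qu < 0 then (frag ++ ['"'], cl)
      else
        let r := pvFrags s qu cl fuel
        if cl < qu then (frag ++ ['"'] ++ r.1, r.2) else (frag ++ r.1, r.2)

-- B's _step: handle one occurrence of the token, purely; returns (text to emit, next start).
-- A one-step lookahead (e, cl, qu) decides the single-fragment case without counting.
def pvStep (s : List Char) (start found : Int) : List Char × Int :=
  let beg := found + 15
  let quoteLoc := pvFind s ['"'] beg
  let closeLoc := pvFind s [')'] beg
  if quoteLoc < 0 ∨ closeLoc < quoteLoc then
    (PySem.List.slice s (some start) (some closeLoc), closeLoc)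
  else
    let e := pvEndQuote s (pvFind s ['"'] (quoteLoc + 1)) (pvFuel s)
    let cl := pvFind s [')'] (e + 1)
    let qu := pvFind s ['"'] (e + 1)
    if qu < 0 ∨ cl ≤ qu then
      (PySem.List.slice s (some start) (some beg) ++ PySem.List.slice s (some beg) (some cl), cl)
    else
      let b := pvFrags s quoteLoc closeLoc (pvFuel s)
      (PySem.List.slice s (some start) (some beg) ++ ['"'] ++ b.1, b.2)

-- B's thin driver: find the next token, apply the step, collect the parts, join once
def pvDriver (s : List Char) (start : Int) (parts : List (List Char)) : Nat → List (List Char)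
  | 0 => parts ++ [PySem.List.slice s (some start) none]
  | fuel+1 =>
    if start < (s.length : Int) then
      let found := pvFind s pvTok start
      if found < 0 then parts ++ [PySem.List.slice s (some start) none]
      else
        let t := pvStep s start found
        pvDriver s t.2 (parts ++ [t.1]) fuel
    else parts ++ [PySem.List.slice s (some start) none]

def fixClangFormat_alt (input : String) : String :=
  String.ofList (pvDriver input.toList 0 [] (pvFuel input.toList)).flatten

-- ===== PRECONDITION & SPEC =====

-- even number of backslashes immediately before position p (a quote there is unescaped)
def pvEscEven (s : List Char) (p : Nat) : Bool :=
  ((s.take p).reverse.takeWhile (· == '\\')).length % 2 == 0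

-- for every '"' after position f: (is it unescaped?, is there a ')' somewhere after it?)
def pvQuoteInfos (s : List Char) (f : Nat) : List (Bool × Bool) :=
  (List.range s.length).filterMap (fun p =>
    if f < p ∧ s[p]? = some '"' then
      some (pvEscEven s p, (s.drop (p + 1)).contains ')') else none)

-- the quotes form a well-terminated sequence of string literals: an opening quote that still has
-- a ')' after it must be closed by a later unescaped quote, and so on after that closing quote
-- (closing = false: the next quote opens a literal; closing = true: a literal is open and must
-- still be closed by an unescaped quote)
def pvWfq (closing : Bool) : List (Bool × Bool) → Bool
  | [] => !closing
  | (u, hp) :: rest =>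
    if closing then
      if u then pvWfq false rest else pvWfq true rest
    else
      if hp then pvWfq true rest else true

-- Pre_ excludes the badly-quoted inputs (an opened string literal, with a ')' still ahead, that is
-- never closed after an occurrence of the search token) on which Python A never returns — it loops forever;
-- the condition is slightly conservative, so a few inputs where A escapes the loop and returns the
-- text unchanged are also excluded (see the cite).
def Pre_fixClangFormat (input : String) : Prop :=
  ((List.range input.toList.length).all (fun f =>
    !(pvTok.isPrefixOf (input.toList.drop f)) || pvWfq false (pvQuoteInfos input.toList f))) = true

instance (input : String) : Decidable (Pre_fixClangFormat input) := by
  unfold Pre_fixClangFormat; infer_instance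

def pvWitness_fixClangFormat : String := "QStringLiteral(\"a\" \"b\")"

def Spec_fixClangFormat (input : String) (out : String) : Prop := out = fixClangFormat_alt input
instance (input : String) (out : String) : Decidable (Spec_fixClangFormat input out) := by
  unfold Spec_fixClangFormat; infer_instance

-- ===== CLAIM (what is proved, stated in full; the proofs are below) =====
def Claim_equal_fixClangFormat : Prop := ∀ (input : String), Dom_fixClangFormat input → Pre_fixClangFormat input → Spec_fixClangFormat input (fixClangFormat input)

-- ===== LEMMAS AND PROOFS =====

-- a successful findFrom points at an occurrence of the pattern (any Int start)
theorem pvFind_prefix (s sub : List Char) (i : Int) (h : pvFind s sub i ≠ -1) :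
    sub <+: s.drop (pvFind s sub i).toNat := by
  unfold pvFind PySem.Chars.findFrom at h ⊢
  simp only at h ⊢
  set st : Int := if i < 0 then if i + ↑s.length < 0 then 0 else i + ↑s.length else i with hst
  have hst0 : 0 ≤ st := by rw [hst]; split_ifs <;> omega
  split_ifs at h ⊢ with h1 h2
  · exact absurd rfl h
  · exact absurd rfl h
  · set r := PySem.Chars.find (List.drop st.toNat (List.take (↑s.length : Int).toNat s)) sub with hr
    have htake : List.take (↑s.length : Int).toNat s = s := by simp
    have hr0 : 0 ≤ r := by
      have := PySem.Chars.neg_one_le_find (List.drop st.toNat (List.take (↑s.length : Int).toNat s)) sub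
      rw [← hr] at this; omega
    have hspec := (PySem.Chars.find_spec (s := List.drop st.toNat (List.take (↑s.length : Int).toNat s)) (sub := sub) (by rw [← hr]; exact hr0)).1
    rw [← hr, htake] at hspec
    rw [htake] at hr
    have : (st + r).toNat = st.toNat + r.toNat := by omega
    rw [this, ← List.drop_drop]
    exact hspec

-- the count pass with a failed guard returns immediately
theorem pvCountPass_exit (s : List Char) :
    ∀ (fuel : Nat) (q c : Int) (n : Nat), ¬ c > q → pvCountPass s q c n fuel = (n, c) := by
  intro fuel q c n h
  cases fuel <;> simp [pvCountPass, h]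

-- single-fragment characterisation: B's lookahead condition pins A's count pass to (1, cl)
theorem pvCountPass_single (s : List Char) (g : Nat) (q c : Int) (hqc : c > q)
    (h : pvFind s ['"'] (pvEndQuote s (pvFind s ['"'] (q + 1)) (pvFuel s) + 1) < 0 ∨
         pvFind s [')'] (pvEndQuote s (pvFind s ['"'] (q + 1)) (pvFuel s) + 1) ≤
         pvFind s ['"'] (pvEndQuote s (pvFind s ['"'] (q + 1)) (pvFuel s) + 1)) :
    pvCountPass s q c 0 (g + 2) =
      (1, pvFind s [')'] (pvEndQuote s (pvFind s ['"'] (q + 1)) (pvFuel s) + 1)) := by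
  show pvCountPass s q c 0 ((g + 1) + 1) = _
  simp only [pvCountPass]
  rw [if_pos hqc]
  split
  · rfl
  next h0 =>
    refine pvCountPass_exit s (g + 1) _ _ _ ?_
    omega

-- the count pass never lowers the running count
theorem pvCountPass_ge (s : List Char) :
    ∀ (fuel : Nat) (q c : Int) (n : Nat), n ≤ (pvCountPass s q c n fuel).1 := by
  intro fuel
  induction fuel with
  | zero => intro q c n; simp [pvCountPass]
  | succ fuel ih =>
    intro q c n
    simp only [pvCountPass]
    split
    · split
      · simp
      · exact le_trans (Nat.le_succ n) (ih _ _ _)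
    · simp

-- with the guard true, the count pass strictly increases the count
theorem pvCountPass_gt (s : List Char) (fuel : Nat) (q c : Int) (n : Nat) (h : c > q) :
    n + 1 ≤ (pvCountPass s q c n (fuel + 1)).1 := by
  simp only [pvCountPass]
  rw [if_pos h]
  split
  · simp
  · exact pvCountPass_ge s fuel _ _ _

-- a continued count pass cannot come back to 1
theorem pvCountPass_cont (s : List Char) (g : Nat) (q c : Int) (hqc : c > q) :
    (pvCountPass s q c 1 (g + 1)).1 ≠ 1 := by
  have h2 := pvCountPass_gt s g q c 1 hqc
  omega

-- multi-fragment: A's count pass does not return 1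
theorem pvCountPass_multi (s : List Char) (g : Nat) (q c : Int) (hqc : c > q)
    (h1 : 0 ≤ pvFind s ['"'] (pvEndQuote s (pvFind s ['"'] (q + 1)) (pvFuel s) + 1))
    (h2 : pvFind s ['"'] (pvEndQuote s (pvFind s ['"'] (q + 1)) (pvFuel s) + 1) <
          pvFind s [')'] (pvEndQuote s (pvFind s ['"'] (q + 1)) (pvFuel s) + 1)) :
    (pvCountPass s q c 0 (g + 2)).1 ≠ 1 := by
  show (pvCountPass s q c 0 ((g + 1) + 1)).1 ≠ 1
  simp only [pvCountPass]
  rw [if_pos hqc,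
    if_neg (show ¬ pvFind s ['"'] (pvEndQuote s (pvFind s ['"'] (q + 1)) (pvFuel s) + 1) < 0 by omega)]
  exact pvCountPass_cont s g _ _ h2

-- A's emit pass appends exactly B's _frags text and ends at the same position
theorem pvEmitPass_eq_pvFrags (s : List Char) :
    ∀ (fuel : Nat) (q c : Int) (out : List Char),
      pvEmitPass s q c out fuel = (out ++ (pvFrags s q c fuel).1, (pvFrags s q c fuel).2) := by
  intro fuel
  induction fuel with
  | zero => intro q c out; simp [pvEmitPass, pvFrags]
  | succ fuel ih =>
    intro q c out
    simp only [pvEmitPass, pvFrags]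
    split
    next hqc =>
      rw [if_neg (show ¬ c ≤ q by omega)]
      set e := pvEndQuote s (pvFind s ['"'] (q + 1)) (pvFuel s) with he
      set frag := PySem.List.slice s (some (q + 1)) (some e) with hfrag
      set cl := pvFind s [')'] (e + 1) with hcl
      set qu := pvFind s ['"'] (e + 1) with hqu
      by_cases h0 : qu < 0
      · simp [h0]
      · rw [if_neg h0, ih qu cl]
        by_cases h1 : cl < qu
        · simp [h0, h1]
        · simp [h0, h1]
    next hqc =>
      rw [if_pos (by omega)]
      simp

-- two successful finds of distinct single characters from the same start differ
theorem pvFind_ne (s : List Char) (i : Int) (c d : Char) (hcd : c ≠ d)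
    (hc : 0 ≤ pvFind s [c] i) (h : pvFind s [c] i = pvFind s [d] i) : False := by
  have h1 := pvFind_prefix s [c] i (by omega)
  have h2 := pvFind_prefix s [d] i (by rw [← h]; omega)
  rw [← h] at h2
  obtain ⟨t1, e1⟩ := h1
  obtain ⟨t2, e2⟩ := h2
  rw [← e2] at e1
  simp at e1
  exact hcd e1.1

-- pvCountPass_single with the lookahead values abstracted (matches the set-variables below)
theorem pvCountPass_single' (s : List Char) (g : Nat) (q c e cl qu : Int)
    (he : e = pvEndQuote s (pvFind s ['"'] (q + 1)) (pvFuel s))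
    (hcl : cl = pvFind s [')'] (e + 1)) (hqu : qu = pvFind s ['"'] (e + 1))
    (hqc : c > q) (h : qu < 0 ∨ cl ≤ qu) :
    pvCountPass s q c 0 (g + 2) = (1, cl) := by
  subst he hcl hqu
  exact pvCountPass_single s g q c hqc h

-- pvCountPass_multi with the lookahead values abstracted
theorem pvCountPass_multi' (s : List Char) (g : Nat) (q c e cl qu : Int)
    (he : e = pvEndQuote s (pvFind s ['"'] (q + 1)) (pvFuel s))
    (hcl : cl = pvFind s [')'] (e + 1)) (hqu : qu = pvFind s ['"'] (e + 1))
    (hqc : c > q) (h1 : 0 ≤ qu) (h2 : qu < cl) :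
    (pvCountPass s q c 0 (g + 2)).1 ≠ 1 := by
  subst he hcl hqu
  exact pvCountPass_multi s g q c hqc h1 h2

-- the outer loops agree, iteration by iteration
theorem pvOuterA_eq_pvDriver (s : List Char) :
    ∀ (fuel : Nat) (start : Int) (parts : List (List Char)),
      pvOuterA s start parts.flatten fuel = (pvDriver s start parts fuel).flatten := by
  intro fuel
  induction fuel with
  | zero => intro st parts; simp [pvOuterA, pvDriver]
  | succ fuel ih =>
    intro st parts
    simp only [pvOuterA, pvDriver, pvStep]
    by_cases hlen : st < (s.length : Int)
    · rw [if_pos hlen, if_pos hlen]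
      by_cases hfound : pvFind s pvTok st < 0
      · rw [if_pos hfound, if_pos hfound]
        simp
      · rw [if_neg hfound, if_neg hfound]
        set beg := pvFind s pvTok st + 15 with hbeg
        set q := pvFind s ['"'] beg with hq
        set c := pvFind s [')'] beg with hc
        by_cases htop : q < 0 ∨ c < q
        · rw [if_pos htop, if_pos htop]
          simpa using ih c (parts ++ [PySem.List.slice s (some st) (some c)])
        · rw [if_neg htop, if_neg htop]
          push_neg at htop
          have hqc : c > q := by
            by_cases hlt : q < c
            · exact hlt
            · exact absurd (pvFind_ne s beg '"' ')' (by decide) (by omega) (by omega)) not_false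
          set e := pvEndQuote s (pvFind s ['"'] (q + 1)) (pvFuel s) with he
          set cl := pvFind s [')'] (e + 1) with hcl
          set qu := pvFind s ['"'] (e + 1) with hqu
          have hF : pvFuel s = s.length + 2 := rfl
          by_cases hsingle : qu < 0 ∨ cl ≤ qu
          · rw [if_pos hsingle]
            have hr : pvCountPass s q c 0 (pvFuel s) = (1, cl) := by
              rw [hF]; exact pvCountPass_single' s s.length q c e cl qu he hcl hqu hqc hsingle
            rw [hr]
            rw [if_pos (show ((1 : Nat), cl).1 = 1 from rfl)]
            simpa using ih cl (parts ++ [PySem.List.slice s (some st) (some beg) ++ PySem.List.slice s (some beg) (some cl)])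
          · rw [if_neg hsingle]
            push_neg at hsingle
            have hne : (pvCountPass s q c 0 (pvFuel s)).1 ≠ 1 := by
              rw [hF]; exact pvCountPass_multi' s s.length q c e cl qu he hcl hqu hqc hsingle.1 hsingle.2
            rw [if_neg hne]
            rw [pvEmitPass_eq_pvFrags s (pvFuel s) q c]
            simpa [List.append_assoc] using
              ih (pvFrags s q c (pvFuel s)).2
                (parts ++ [PySem.List.slice s (some st) (some beg) ++ ['"'] ++ (pvFrags s q c (pvFuel s)).1])
    · rw [if_neg hlen, if_neg hlen]
      simp

-- ===== VERDICT (by name: the statement is the Claim_ definition above) =====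
theorem fixClangFormat_spec : Claim_equal_fixClangFormat := by
  intro input _ _
  unfold Spec_fixClangFormat fixClangFormat fixClangFormat_alt
  have h := pvOuterA_eq_pvDriver input.toList (pvFuel input.toList) 0 []
  simpa using congrArg String.ofList h
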